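-- pv_equiv track=rewrite | github.com/iottrends/ofdm-hls | sim/fec_reference.py | conv_encode_header
-- ===== SOURCE A (Python) =====
-- def conv_encode_header(input_bits, rate: str = "1/2") -> list:
--     """K=7 convolutional encoder for the OFDM header.
--
--     input_bits : iterable of bits to encode (MSB first).  Typically this is
--                  (payload_bits || CRC-16) — the caller composes them.
--     rate       : "1/2" → (G0, G1) — 2 output bits per input
--                  "1/3" → (G0, G1, G2) — 3 output bits per input
--
--     Appends 6 zero tail bits before encoding to flush the trellis.
--     Returns: list of coded bits, length = (len(input_bits) + 6) × {2 or 3}.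
--     """
--     if rate not in ("1/2", "1/3"):
--         raise ValueError(f"unsupported header FEC rate: {rate!r} (use '1/2' or '1/3')")
--     bits = list(input_bits)
--
--     sr = 0  # 6-bit shift register, bit 5 = newest
--     coded = []
--     for b in bits + [0] * 6:                     # +6 tail bits to flush
--         b  = int(b) & 1
--         # Compute all generators BEFORE updating sr (they depend on the
--         # current state).
--         g0 = b ^ ((sr>>4)&1) ^ ((sr>>3)&1) ^ ((sr>>1)&1) ^ (sr&1)
--         g1 = b ^ ((sr>>5)&1) ^ ((sr>>4)&1) ^ ((sr>>3)&1) ^ (sr&1)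
--         coded.append(g0)
--         coded.append(g1)
--         if rate == "1/3":
--             g2 = b ^ ((sr>>5)&1) ^ ((sr>>4)&1) ^ ((sr>>2)&1) ^ (sr&1)
--             coded.append(g2)
--         sr = ((b << 5) | (sr >> 1)) & 0x3F
--     return coded
-- ===== SOURCE B (Python) =====
-- def conv_encode_header(input_bits, rate: str = "1/2") -> list:
--     """Stateless windowed re-implementation: pad the bit stream with 6 zeros
--     on each side and zip seven shifted views; no shift register is kept."""
--     if rate not in ("1/2", "1/3"):
--         raise ValueError(f"unsupported header FEC rate: {rate!r} (use '1/2' or '1/3')")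
--     x = [0] * 6 + [int(b) & 1 for b in input_bits] + [0] * 6
--     out = []
--     for a, b, c, d, e, f, g in zip(x[6:], x[5:], x[4:], x[3:], x[2:], x[1:], x):
--         out.append(a ^ c ^ d ^ f ^ g)
--         out.append(a ^ b ^ c ^ d ^ g)
--         if rate == "1/3":
--             out.append(a ^ b ^ c ^ e ^ g)
--     return out
-- ===== Notes on version B (the rewrite author's own statement) =====
-- stated objective: alternative
-- what changed: Replaces the stateful 6-bit shift register with a stateless windowed formulation: the bit stream is zero-padded on both sides and seven shifted views are zipped, each output bit being an xor of fixed offsets into the padded array.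
import Mathlib
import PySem

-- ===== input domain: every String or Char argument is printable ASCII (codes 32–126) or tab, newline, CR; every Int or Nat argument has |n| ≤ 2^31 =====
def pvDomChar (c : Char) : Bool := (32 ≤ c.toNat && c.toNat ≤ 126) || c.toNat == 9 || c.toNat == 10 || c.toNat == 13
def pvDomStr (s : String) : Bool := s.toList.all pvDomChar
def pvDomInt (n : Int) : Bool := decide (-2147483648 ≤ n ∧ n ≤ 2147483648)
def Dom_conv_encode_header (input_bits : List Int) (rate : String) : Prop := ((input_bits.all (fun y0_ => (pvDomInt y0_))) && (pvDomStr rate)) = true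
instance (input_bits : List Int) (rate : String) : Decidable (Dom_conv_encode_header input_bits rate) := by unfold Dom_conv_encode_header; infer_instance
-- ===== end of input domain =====

-- B rewrites the shift-register loop as a stateless zip of seven shifted views of
-- a zero-padded bit array (objective: alternative decomposition, same cost).

-- ===== PORT A =====
-- one loop iteration of A: compute g0/g1(/g2) from the current shift register, then shift
def stepA (r3 : Bool) (st : Int × List Int) (b : Int) : Int × List Int :=
  let bl := PySem.Int.band b 1
  let sr := st.1
  let g0 := PySem.Int.bxor (PySem.Int.bxor (PySem.Int.bxor (PySem.Int.bxor bl (PySem.Int.band (sr >>> 4) 1)) (PySem.Int.band (sr >>> 3) 1)) (PySem.Int.band (sr >>> 1) 1)) (PySem.Int.band sr 1)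
  let g1 := PySem.Int.bxor (PySem.Int.bxor (PySem.Int.bxor (PySem.Int.bxor bl (PySem.Int.band (sr >>> 5) 1)) (PySem.Int.band (sr >>> 4) 1)) (PySem.Int.band (sr >>> 3) 1)) (PySem.Int.band sr 1)
  let coded := st.2 ++ [g0, g1] ++
    (if r3 then [PySem.Int.bxor (PySem.Int.bxor (PySem.Int.bxor (PySem.Int.bxor bl (PySem.Int.band (sr >>> 5) 1)) (PySem.Int.band (sr >>> 4) 1)) (PySem.Int.band (sr >>> 2) 1)) (PySem.Int.band sr 1)] else [])
  (PySem.Int.band (PySem.Int.bor (bl <<< 5) (sr >>> 1)) 63, coded)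

def conv_encode_header (input_bits : List Int) (rate : String) : List Int :=
  if rate == "1/2" || rate == "1/3" then
    ((input_bits ++ List.replicate 6 0).foldl (stepA (rate == "1/3")) (0, [])).2
  else []  -- Python raises ValueError here; excluded by Pre_

-- ===== PORT B =====
-- the zip loop of Source B: seven parallel views, newest bit first
def zipEmit (r3 : Bool) : List Int → List Int → List Int → List Int → List Int → List Int → List Int → List Int
  | a :: as_, b :: bs, c :: cs, d :: ds, e :: es, f :: fs, g :: gs =>
    [PySem.Int.bxor (PySem.Int.bxor (PySem.Int.bxor (PySem.Int.bxor a c) d) f) g,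
     PySem.Int.bxor (PySem.Int.bxor (PySem.Int.bxor (PySem.Int.bxor a b) c) d) g] ++
    (if r3 then [PySem.Int.bxor (PySem.Int.bxor (PySem.Int.bxor (PySem.Int.bxor a b) c) e) g] else []) ++
    zipEmit r3 as_ bs cs ds es fs gs
  | _, _, _, _, _, _, _ => []

def conv_encode_header_alt (input_bits : List Int) (rate : String) : List Int :=
  if rate == "1/2" || rate == "1/3" then
    let x := List.replicate 6 (0 : Int) ++ input_bits.map (fun b => PySem.Int.band b 1) ++ List.replicate 6 0
    zipEmit (rate == "1/3") (x.drop 6) (x.drop 5) (x.drop 4) (x.drop 3) (x.drop 2) (x.drop 1) x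
  else []  -- Source B raises ValueError here; excluded by Pre_

-- ===== PRECONDITION & SPEC =====
-- Pre_ excludes exactly the rates on which both Pythons raise ValueError.
def Pre_conv_encode_header (input_bits : List Int) (rate : String) : Prop :=
  rate = "1/2" ∨ rate = "1/3"
instance (input_bits : List Int) (rate : String) : Decidable (Pre_conv_encode_header input_bits rate) := by unfold Pre_conv_encode_header; infer_instance
def pvWitness_conv_encode_header : List Int × String := ([1, 0, 1, 1], "1/2")

def Spec_conv_encode_header (input_bits : List Int) (rate : String) (out : List Int) : Prop := out = conv_encode_header_alt input_bits rate
instance (input_bits : List Int) (rate : String) (out : List Int) : Decidable (Spec_conv_encode_header input_bits rate out) := by unfold Spec_conv_encode_header; infer_instance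

-- ===== CLAIM (what is proved, stated in full; the proofs are below) =====
def Claim_equal_conv_encode_header : Prop := ∀ (input_bits : List Int) (rate : String), Dom_conv_encode_header input_bits rate → Pre_conv_encode_header input_bits rate → Spec_conv_encode_header input_bits rate (conv_encode_header input_bits rate)

-- ===== LEMMAS AND PROOFS =====

-- common windowed recursion: history h1 (newest) … h6 (oldest), bits already masked to {0,1}
def T (r3 : Bool) (h1 h2 h3 h4 h5 h6 : Int) : List Int → List Int
  | [] => []
  | a :: t =>
    [PySem.Int.bxor (PySem.Int.bxor (PySem.Int.bxor (PySem.Int.bxor a h2) h3) h5) h6,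
     PySem.Int.bxor (PySem.Int.bxor (PySem.Int.bxor (PySem.Int.bxor a h1) h2) h3) h6] ++
    (if r3 then [PySem.Int.bxor (PySem.Int.bxor (PySem.Int.bxor (PySem.Int.bxor a h1) h2) h4) h6] else []) ++
    T r3 a h1 h2 h3 h4 h5 t

lemma land_one_cases (b : Int) : PySem.Int.band b 1 = 0 ∨ PySem.Int.band b 1 = 1 := by
  rw [PySem.Int.band_one]
  have h1 := PySem.Int.mod_nonneg (a := b) (b := 2) (by norm_num)
  have h2 := PySem.Int.mod_lt (a := b) (b := 2) (by norm_num)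
  omega

lemma bit_facts (bl h1 h2 h3 h4 h5 h6 : Int)
    (hb : bl = 0 ∨ bl = 1) (e1 : h1 = 0 ∨ h1 = 1) (e2 : h2 = 0 ∨ h2 = 1)
    (e3 : h3 = 0 ∨ h3 = 1) (e4 : h4 = 0 ∨ h4 = 1) (e5 : h5 = 0 ∨ h5 = 1)
    (e6 : h6 = 0 ∨ h6 = 1) :
    (PySem.Int.band ((32*h1+16*h2+8*h3+4*h4+2*h5+h6 : Int) >>> 5) 1 = h1 ∧
     PySem.Int.band ((32*h1+16*h2+8*h3+4*h4+2*h5+h6 : Int) >>> 4) 1 = h2 ∧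
     PySem.Int.band ((32*h1+16*h2+8*h3+4*h4+2*h5+h6 : Int) >>> 3) 1 = h3 ∧
     PySem.Int.band ((32*h1+16*h2+8*h3+4*h4+2*h5+h6 : Int) >>> 2) 1 = h4 ∧
     PySem.Int.band ((32*h1+16*h2+8*h3+4*h4+2*h5+h6 : Int) >>> 1) 1 = h5 ∧
     PySem.Int.band (32*h1+16*h2+8*h3+4*h4+2*h5+h6 : Int) 1 = h6 ∧
     PySem.Int.band (PySem.Int.bor (bl <<< 5) ((32*h1+16*h2+8*h3+4*h4+2*h5+h6 : Int) >>> 1)) 63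
       = 32*bl+16*h1+8*h2+4*h3+2*h4+h5) := by
  rcases hb with rfl | rfl <;> rcases e1 with rfl | rfl <;> rcases e2 with rfl | rfl <;>
    rcases e3 with rfl | rfl <;> rcases e4 with rfl | rfl <;> rcases e5 with rfl | rfl <;>
    rcases e6 with rfl | rfl <;> decide

lemma foldA (r3 : Bool) : ∀ (l : List Int) (h1 h2 h3 h4 h5 h6 : Int),
    (h1 = 0 ∨ h1 = 1) → (h2 = 0 ∨ h2 = 1) → (h3 = 0 ∨ h3 = 1) → (h4 = 0 ∨ h4 = 1) →
    (h5 = 0 ∨ h5 = 1) → (h6 = 0 ∨ h6 = 1) → ∀ acc : List Int,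
    (l.foldl (stepA r3) (32*h1+16*h2+8*h3+4*h4+2*h5+h6, acc)).2
      = acc ++ T r3 h1 h2 h3 h4 h5 h6 (l.map (fun b => PySem.Int.band b 1)) := by
  intro l
  induction l with
  | nil => intro h1 h2 h3 h4 h5 h6 _ _ _ _ _ _ acc; simp [T]
  | cons b t ih =>
    intro h1 h2 h3 h4 h5 h6 e1 e2 e3 e4 e5 e6 acc
    have hb := land_one_cases b
    obtain ⟨f1, f2, f3, f4, f5, f6, f7⟩ :=
      bit_facts (PySem.Int.band b 1) h1 h2 h3 h4 h5 h6 hb e1 e2 e3 e4 e5 e6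
    simp only [List.foldl_cons, stepA]
    rw [f1, f2, f3, f4, f5, f6, f7,
      ih (PySem.Int.band b 1) h1 h2 h3 h4 h5 hb e1 e2 e3 e4 e5]
    simp [T, List.append_assoc]

lemma zipEmit_eq (r3 : Bool) : ∀ (t : List Int) (h1 h2 h3 h4 h5 h6 : Int),
    zipEmit r3 t (h1::t) (h2::h1::t) (h3::h2::h1::t) (h4::h3::h2::h1::t)
      (h5::h4::h3::h2::h1::t) (h6::h5::h4::h3::h2::h1::t)
      = T r3 h1 h2 h3 h4 h5 h6 t := by
  intro t
  induction t with
  | nil => intro _ _ _ _ _ _; rfl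
  | cons a t ih => intro h1 h2 h3 h4 h5 h6; simp [zipEmit, T, ih]

-- A's whole loop from the zero register equals the windowed recursion T
lemma foldA0 (r3 : Bool) (l : List Int) :
    (l.foldl (stepA r3) (0, [])).2 = T r3 0 0 0 0 0 0 (l.map (fun b => PySem.Int.band b 1)) := by
  have h := foldA r3 l 0 0 0 0 0 0 (Or.inl rfl) (Or.inl rfl) (Or.inl rfl)
    (Or.inl rfl) (Or.inl rfl) (Or.inl rfl) []
  rw [show (32*0+16*0+8*0+4*0+2*0+0 : Int) = 0 from by norm_num] at h
  simpa using h

-- B's seven shifted views of the padded array equal the same windowed recursion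
lemma B_char (r3 : Bool) (mb : List Int) :
    zipEmit r3 ((List.replicate 6 (0:Int) ++ mb ++ List.replicate 6 0).drop 6)
      ((List.replicate 6 (0:Int) ++ mb ++ List.replicate 6 0).drop 5)
      ((List.replicate 6 (0:Int) ++ mb ++ List.replicate 6 0).drop 4)
      ((List.replicate 6 (0:Int) ++ mb ++ List.replicate 6 0).drop 3)
      ((List.replicate 6 (0:Int) ++ mb ++ List.replicate 6 0).drop 2)
      ((List.replicate 6 (0:Int) ++ mb ++ List.replicate 6 0).drop 1)
      (List.replicate 6 (0:Int) ++ mb ++ List.replicate 6 0)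
      = T r3 0 0 0 0 0 0 (mb ++ List.replicate 6 0) :=
  zipEmit_eq r3 (mb ++ List.replicate 6 0) 0 0 0 0 0 0

-- ===== VERDICT (by name: the statement is the Claim_ definition above) =====
theorem conv_encode_header_spec : Claim_equal_conv_encode_header := by
  intro input_bits rate _ hpre
  unfold Spec_conv_encode_header conv_encode_header conv_encode_header_alt
  have hg : (rate == "1/2" || rate == "1/3") = true := by
    rcases hpre with rfl | rfl <;> rfl
  · simp only [hg, if_pos]
    have hband0 : PySem.Int.band (0:Int) 1 = 0 := by decide
    have hmap : (input_bits ++ List.replicate 6 0).map (fun b => PySem.Int.band b 1)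
        = input_bits.map (fun b => PySem.Int.band b 1) ++ List.replicate 6 (0:Int) := by
      simp [hband0]
    exact (foldA0 (rate == "1/3") (input_bits ++ List.replicate 6 0)).trans
      (by rw [hmap]
          exact (B_char (rate == "1/3") (input_bits.map (fun b => PySem.Int.band b 1))).symm)
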